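-- pv_equiv track=rewrite | github.com/sylwesterfischer-design/DailySessionLogger_v2 | scripts/csv_repair_horizontal_summary/repair_daily_session_summary.py | repair_fields
-- ===== SOURCE A (Python) =====
-- from typing import List, Optional, Tuple
--
-- EXPECTED_COLS = 14
--
-- def repair_fields(fields: List[str]) -> Tuple[List[str], int]:
--     """
--     Usuń powtórzenia bloków po EXPECTED_COLS kolumn.
--     Zwraca (nowe_pola, liczba_usunietych_kolumn).
--     """
--     orig_len = len(fields)
--     f = list(fields)
--     removed = 0
--     while len(f) >= 2 * EXPECTED_COLS:
--         a = f[:EXPECTED_COLS]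
--         b = f[EXPECTED_COLS : 2 * EXPECTED_COLS]
--         if a == b:
--             f = f[:EXPECTED_COLS] + f[2 * EXPECTED_COLS :]
--             removed += EXPECTED_COLS
--         else:
--             break
--     if len(f) > EXPECTED_COLS:
--         removed += len(f) - EXPECTED_COLS
--         f = f[:EXPECTED_COLS]
--     return f, removed
-- ===== SOURCE B (Python) =====
-- from typing import List, Tuple
--
-- EXPECTED_COLS = 14
--
-- def repair_fields(fields: List[str]) -> Tuple[List[str], int]:
--     # Closed form: the dedup loop never changes the final result -
--     # everything beyond the first EXPECTED_COLS columns is removed and counted.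
--     n = len(fields)
--     if n > EXPECTED_COLS:
--         return fields[:EXPECTED_COLS], n - EXPECTED_COLS
--     return list(fields), 0
-- ===== Notes on version B (the rewrite author's own statement) =====
-- stated objective: simpler
-- what changed: Replaced A's iterative duplicate-block comparison loop plus final truncation with a single closed-form slice: the output is always the first 14 fields and the count the number of fields beyond 14.
import Mathlib
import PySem

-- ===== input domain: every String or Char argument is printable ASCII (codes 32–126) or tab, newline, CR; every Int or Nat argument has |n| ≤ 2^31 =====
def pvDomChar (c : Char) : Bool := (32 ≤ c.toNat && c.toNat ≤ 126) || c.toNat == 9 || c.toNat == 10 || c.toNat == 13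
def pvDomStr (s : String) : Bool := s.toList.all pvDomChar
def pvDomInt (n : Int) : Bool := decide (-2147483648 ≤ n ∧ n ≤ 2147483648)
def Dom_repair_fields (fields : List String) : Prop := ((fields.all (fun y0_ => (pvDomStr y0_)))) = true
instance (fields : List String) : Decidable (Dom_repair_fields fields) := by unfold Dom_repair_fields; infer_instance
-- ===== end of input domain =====

-- B replaces A's duplicate-block dedup loop + truncation with one closed-form
-- slice-and-subtract (objective: simpler); return value only, A does not mutate.

-- ===== PORT A =====
-- while len(f) >= 2*14: compare f[:14] with f[14:28]; if equal drop the second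
-- block and add 14 to removed, else break.  (Slices with nonnegative in-range
-- bounds are exactly List.take/drop here.)
def repairLoopA (f : List String) (removed : Int) : List String × Int :=
  if 2 * 14 ≤ f.length then
    if f.take 14 = (f.drop 14).take 14 then
      repairLoopA (f.take 14 ++ f.drop (2 * 14)) (removed + 14)
    else (f, removed)
  else (f, removed)
termination_by f.length
decreasing_by simp; omega

def repair_fields (fields : List String) : List String × Int :=
  let fr := repairLoopA fields 0
  if 14 < fr.1.length then
    (fr.1.take 14, fr.2 + ((fr.1.length : Int) - 14))
  else (fr.1, fr.2)

-- ===== PORT B =====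
def repair_fields_alt (fields : List String) : List String × Int :=
  if 14 < fields.length then (fields.take 14, (fields.length : Int) - 14)
  else (fields, 0)

-- ===== PRECONDITION & SPEC =====
def Spec_repair_fields (fields : List String) (out : List String × Int) : Prop := out = repair_fields_alt fields
instance (fields : List String) (out : List String × Int) : Decidable (Spec_repair_fields fields out) := by unfold Spec_repair_fields; infer_instance

-- ===== CLAIM (what is proved, stated in full; the proofs are below) =====
def Claim_equal_repair_fields : Prop := ∀ (fields : List String), Dom_repair_fields fields → Spec_repair_fields fields (repair_fields fields)

-- ===== LEMMAS AND PROOFS =====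

-- A's post-truncation step, applied to an arbitrary loop state.
def postA (fr : List String × Int) : List String × Int :=
  if 14 < fr.1.length then (fr.1.take 14, fr.2 + ((fr.1.length : Int) - 14))
  else (fr.1, fr.2)

-- The dedup loop never changes the post-truncated result.
theorem postA_repairLoopA (f : List String) (r : Int) :
    postA (repairLoopA f r) = postA (f, r) := by
  fun_induction repairLoopA f r with
  | case1 f r hlen heq ih =>
    rw [ih]
    unfold postA
    simp only
    have hl : (f.take 14 ++ f.drop (2 * 14)).length = f.length - 14 := by
      simp; omega
    have htk : List.take 14 (f.take 14 ++ f.drop (2 * 14)) = f.take 14 := by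
      rw [List.take_append_of_le_length (by simp; omega)]
      simp
    by_cases h : 14 < f.length - 14
    · rw [if_pos (by omega : 14 < f.length), if_pos (by rw [hl]; exact h)]
      simp only [Prod.mk.injEq]
      refine ⟨htk, ?_⟩
      rw [hl]; omega
    · -- here f.length = 28: the truncation branch is not taken after the drop
      rw [if_neg (by rw [hl]; omega), if_pos (by omega : 14 < f.length)]
      have hd : f.drop (2 * 14) = [] := by
        apply List.eq_nil_of_length_eq_zero; simp; omega
      simp only [Prod.mk.injEq]
      refine ⟨by simp [hd], by omega⟩
  | case2 f r hlen heq => rfl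
  | case3 f r hlen => rfl

theorem repair_fields_eq_postA (fields : List String) :
    repair_fields fields = postA (repairLoopA fields 0) := rfl

-- ===== VERDICT (by name: the statement is the Claim_ definition above) =====
theorem repair_fields_spec : Claim_equal_repair_fields := by
  intro fields _
  unfold Spec_repair_fields
  rw [repair_fields_eq_postA, postA_repairLoopA]
  unfold postA repair_fields_alt
  simp only
  split <;> simp
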